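-- pv_equiv track=rewrite | github.com/ai-kmu/etc | algorithm/Intermediate_Class/04_괄호변환/Wooseong.py | split_u_v
-- ===== SOURCE A (Python) =====
-- def split_u_v(p):
--     l, r = 0, 0
--     u, v = '', ''
--     for pp in p:
--         if l != 0 and l == r:
--             v += pp
--             continue
--
--         if pp == '(': l += 1
--         else: r += 1
--
--         u += pp
--     return u, v
-- ===== SOURCE B (Python) =====
-- def split_u_v(p):
--     # Find the length of the shortest nonempty prefix with balance 0, then slice.
--     bal = 0
--     split = len(p)
--     for i, ch in enumerate(p):
--         bal += 1 if ch == '(' else -1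
--         if bal == 0:
--             split = i + 1
--             break
--     return p[:split], p[split:]
-- ===== Notes on version B (the rewrite author's own statement) =====
-- stated objective: simpler
-- what changed: B tracks a single running balance to find the first balance-zero prefix length and returns two slices, instead of A's interleaved scan that maintains two counters and builds u and v character by character.
import Mathlib
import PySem

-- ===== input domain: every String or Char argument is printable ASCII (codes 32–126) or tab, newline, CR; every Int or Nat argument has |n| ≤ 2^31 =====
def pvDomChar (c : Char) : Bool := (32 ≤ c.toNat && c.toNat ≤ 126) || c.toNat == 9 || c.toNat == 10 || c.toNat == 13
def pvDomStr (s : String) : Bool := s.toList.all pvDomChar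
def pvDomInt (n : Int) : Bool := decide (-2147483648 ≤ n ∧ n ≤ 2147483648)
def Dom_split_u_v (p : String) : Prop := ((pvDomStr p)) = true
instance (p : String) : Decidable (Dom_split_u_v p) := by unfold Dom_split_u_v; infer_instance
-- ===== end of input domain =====

-- B finds the first balance-zero prefix length with one running counter and slices, instead of A's interleaved two-counter scan building u and v char by char; objective: simpler.


-- ===== PORT A =====
-- state: (l, r, u, v)
def split_u_v_step (s : Int × Int × List Char × List Char) (pp : Char) : Int × Int × List Char × List Char :=
  let (l, r, u, v) := s
  if l ≠ 0 ∧ l = r then (l, r, u, v ++ [pp])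
  else if pp = '(' then (l + 1, r, u ++ [pp], v)
  else (l, r + 1, u ++ [pp], v)

def split_u_v (p : String) : String × String :=
  let st := p.toList.foldl split_u_v_step (0, 0, [], [])
  (String.mk st.2.2.1, String.mk st.2.2.2)

-- ===== PORT B =====
-- the 'for i, ch in enumerate(p): … break' loop of Source B, with default split = n
def split_u_v_find (cs : List Char) (bal : Int) (i : Nat) (n : Nat) : Nat :=
  match cs with
  | [] => n
  | c :: rest =>
      let bal' := bal + (if c = '(' then 1 else -1)
      if bal' = 0 then i + 1 else split_u_v_find rest bal' (i + 1) n

def split_u_v_alt (p : String) : String × String :=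
  let cs := p.toList
  let split := split_u_v_find cs 0 0 cs.length
  -- p[:split], p[split:] with 0 ≤ split ≤ len(p): exact as take/drop
  (String.mk (cs.take split), String.mk (cs.drop split))

-- ===== PRECONDITION & SPEC =====
def Spec_split_u_v (p : String) (out : String × String) : Prop := out = split_u_v_alt p
instance (p : String) (out : String × String) : Decidable (Spec_split_u_v p out) := by unfold Spec_split_u_v; infer_instance

-- ===== CLAIM (what is proved, stated in full; the proofs are below) =====
def Claim_equal_split_u_v : Prop := ∀ (p : String), Dom_split_u_v p → Spec_split_u_v p (split_u_v p)

-- ===== LEMMAS AND PROOFS =====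

-- once the split condition holds, every remaining char goes to v
theorem split_u_v_post (cs : List Char) (l r : Int) (u v : List Char)
    (h : l ≠ 0 ∧ l = r) :
    cs.foldl split_u_v_step (l, r, u, v) = (l, r, u, v ++ cs) := by
  induction cs generalizing v with
  | nil => simp
  | cons c rest ih =>
      simp only [List.foldl_cons, split_u_v_step, if_pos h]
      rw [ih]
      simp

theorem split_u_v_find_shift (cs : List Char) (bal : Int) (i n : Nat) :
    split_u_v_find cs bal (i + 1) (n + 1) = split_u_v_find cs bal i n + 1 := by
  induction cs generalizing bal i with
  | nil => rfl
  | cons c rest ih =>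
      simp only [split_u_v_find]
      by_cases hz : bal + (if c = '(' then (1 : Int) else -1) = 0
      · simp [hz]
      · simp [hz, ih]

-- pre-split phase: A's (u, v) agrees with the first-zero-balance split of B
theorem split_u_v_pre (cs : List Char) (l r : Int) (u : List Char)
    (hl : 0 ≤ l) (hr : 0 ≤ r) (h : ¬ (l ≠ 0 ∧ l = r)) :
    (cs.foldl split_u_v_step (l, r, u, [])).2.2 =
      (u ++ cs.take (split_u_v_find cs (l - r) 0 cs.length),
       cs.drop (split_u_v_find cs (l - r) 0 cs.length)) := by
  induction cs generalizing l r u with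
  | nil => simp [split_u_v_find]
  | cons c rest ih =>
      simp only [List.foldl_cons, split_u_v_step, if_neg h, split_u_v_find, List.length_cons]
      by_cases hc : c = '('
      · simp only [if_pos hc]
        by_cases hz : l - r + 1 = 0
        · rw [split_u_v_post rest _ _ _ _ ⟨by omega, by omega⟩, if_pos hz]
          simp
        · rw [if_neg hz,
              ih (l + 1) r (u ++ [c]) (by omega) hr (by intro hh; apply hz; omega)]
          have hb : l + 1 - r = l - r + 1 := by ring
          rw [hb, split_u_v_find_shift]
          simp
      · simp only [if_neg hc]
        by_cases hz : l - r + -1 = 0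
        · rw [split_u_v_post rest _ _ _ _ ⟨by omega, by omega⟩, if_pos hz]
          simp
        · rw [if_neg hz,
              ih l (r + 1) (u ++ [c]) hl (by omega) (by intro hh; apply hz; omega)]
          have hb : l - (r + 1) = l - r + -1 := by ring
          rw [hb, split_u_v_find_shift]
          simp

-- ===== VERDICT (by name: the statement is the Claim_ definition above) =====
theorem split_u_v_spec : Claim_equal_split_u_v := by
  intro p _
  unfold Spec_split_u_v split_u_v split_u_v_alt
  have h := split_u_v_pre p.toList 0 0 [] le_rfl le_rfl (by simp)
  norm_num at h
  simp [h]
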